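-- pv_equiv track=rewrite | github.com/BenchleyKim/Study | Algorithm_Study/PGM0703/tst01.py | solution
-- ===== SOURCE A (Python) =====
-- def pop(stack, registers , name, answer) :
--     if not stack :
--         answer.append("EMPTY")
--         return
--     if name == 'A' :
--         registers[0] = stack.pop()
--         return
--     if name == 'B' :
--         registers[1] = stack.pop()
--         return
--
-- def push(stack, cnt, answer) :
--     if len(stack) >= 8 :
--         answer.append("OVERFLOW")
--         return
--     stack.append(cnt)
--     return
--
-- def swap(registers , answer ) :
--     if None in registers :
--         answer.append("ERROR")
--         return
--     registers[0], registers[1] =registers[1], registers[0]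
--     return
--
-- def sub(registers , stack, answer ) :
--     if None in registers :
--         answer.append("ERROR")
--         return
--     stack.append(registers[0]- registers[1])
--     return
--
-- def add(registers , stack ,answer ) :
--     if None in registers :
--         answer.append("ERROR")
--         return
--     stack.append(registers[0] + registers[1])
--     return
--
-- def prt(stack, answer ) :
--     if not stack :
--         answer.append("EMPTY")
--         return
--     answer.append(str(stack.pop()))
--
-- def solution(params):
--
--     answer = []
--     stack = [ ]
--     registers = [None, None]
--     # commands = {"POPA" : pop(stack,registers,"A", answer), "POPB" :pop(stack,registers,"B", answer),
--     #             "ADD" : add(registers, stack, answer), "SUB" : sub(registers, stack, answer),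
--     #             "PUSH0" : push(stack, 0, answer), "PUSH1" : push(stack, 1, answer),
--     #             "PUSH2" : push(stack, 2, answer), "PUSH3" : push(stack, 3, answer),
--     #             "SWAP" : swap(registers, answer), "PRINT" : prt(stack,answer)}
--     commands = ["POPA", "POPB" ,"ADD" , "SUB" , "PUSH0" , "PUSH1" ,"PUSH2" , "PUSH3" ,"SWAP" , "PRINT" ]
--     for cmd in params :
--         if not cmd in commands :
--             answer.append("UNKNOWN")
--             continue
--         if cmd == "POPA" :
--             pop(stack,registers,"A", answer)
--         if cmd == "POPB" :
--             pop(stack,registers,"B", answer)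
--         if cmd == "ADD" :
--             add(registers, stack, answer)
--         if cmd == "SUB" :
--             sub(registers, stack, answer)
--         if cmd == "PUSH0" :
--             push(stack, 0, answer)
--         if cmd == "PUSH1" :
--             push(stack, 1, answer)
--         if cmd == "PUSH2" :
--             push(stack, 2, answer)
--         if cmd == "PUSH3" :
--             push(stack, 3, answer)
--         if cmd == "SWAP" :
--             swap(registers, answer)
--         if cmd == "PRINT" :
--             prt(stack,answer)
--
--
--
--     return answer
-- ===== SOURCE B (Python) =====
-- def solution(params):
--     # table-driven interpreter over immutable state (stack, regs, out)
--     def popr(i):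
--         def f(st, regs, out):
--             if not st:
--                 return st, regs, out + ["EMPTY"]
--             regs = list(regs)
--             regs[i] = st[-1]
--             return st[:-1], regs, out
--         return f
--
--     def pushc(c):
--         def f(st, regs, out):
--             if len(st) >= 8:
--                 return st, regs, out + ["OVERFLOW"]
--             return st + [c], regs, out
--         return f
--
--     def binop(op):
--         def f(st, regs, out):
--             if None in regs:
--                 return st, regs, out + ["ERROR"]
--             return st + [op(regs[0], regs[1])], regs, out
--         return f
--
--     def swapf(st, regs, out):
--         if None in regs:
--             return st, regs, out + ["ERROR"]
--         return st, [regs[1], regs[0]], out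
--
--     def prtf(st, regs, out):
--         if not st:
--             return st, regs, out + ["EMPTY"]
--         return st[:-1], regs, out + [str(st[-1])]
--
--     table = {"POPA": popr(0), "POPB": popr(1),
--              "ADD": binop(lambda x, y: x + y), "SUB": binop(lambda x, y: x - y),
--              "PUSH0": pushc(0), "PUSH1": pushc(1), "PUSH2": pushc(2), "PUSH3": pushc(3),
--              "SWAP": swapf, "PRINT": prtf}
--
--     st, regs, out = [], [None, None], []
--     for cmd in params:
--         f = table.get(cmd)
--         if f is None:
--             out = out + ["UNKNOWN"]
--         else:
--             st, regs, out = f(st, regs, out)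
--     return out
-- ===== Notes on version B (the rewrite author's own statement) =====
-- stated objective: idiomatic
-- what changed: Replaces the list-membership scan plus ten-way if-cascade over mutating helpers with a single dispatch table mapping each command to a pure state-transformer (pop/push/add-sub/swap/print factored into four parameterised closures) folded over an immutable (stack, regs, out) state.
import Mathlib
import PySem

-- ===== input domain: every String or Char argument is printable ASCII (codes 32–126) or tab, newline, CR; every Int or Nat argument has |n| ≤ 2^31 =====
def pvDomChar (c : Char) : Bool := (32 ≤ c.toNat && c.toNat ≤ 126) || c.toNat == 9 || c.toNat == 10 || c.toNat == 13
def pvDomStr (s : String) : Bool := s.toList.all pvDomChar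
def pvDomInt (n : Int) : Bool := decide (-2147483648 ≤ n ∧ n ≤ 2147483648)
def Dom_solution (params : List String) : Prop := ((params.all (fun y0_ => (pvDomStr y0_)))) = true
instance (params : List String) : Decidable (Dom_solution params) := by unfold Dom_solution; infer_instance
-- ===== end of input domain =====

-- B replaces A's membership scan + ten-way if-cascade of mutating helpers with a
-- dispatch table of pure state-transformers folded over an immutable state (idiomatic rewrite).


-- state shared shape: (stack, registers, answer)
def PvSt : Type := List Int × List (Option Int) × List String

-- ===== PORT A =====
-- pop: stack.pop() pops the LAST element (getLast!/dropLast); empty stack appends "EMPTY"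
def pyPop (s : PvSt) (name : Char) : PvSt :=
  match s with
  | (stack, regs, answer) =>
    if stack.isEmpty then (stack, regs, answer ++ ["EMPTY"])
    else if name = 'A' then (stack.dropLast, regs.set 0 (some stack.getLast!), answer)
    else if name = 'B' then (stack.dropLast, regs.set 1 (some stack.getLast!), answer)
    else (stack, regs, answer)

def pyPush (s : PvSt) (cnt : Int) : PvSt :=
  match s with
  | (stack, regs, answer) =>
    if stack.length ≥ 8 then (stack, regs, answer ++ ["OVERFLOW"])
    else (stack ++ [cnt], regs, answer)

def pySwap (s : PvSt) : PvSt :=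
  match s with
  | (stack, regs, answer) =>
    if regs.contains none then (stack, regs, answer ++ ["ERROR"])
    else (stack, [regs[1]!, regs[0]!], answer)

def pySub (s : PvSt) : PvSt :=
  match s with
  | (stack, regs, answer) =>
    if regs.contains none then (stack, regs, answer ++ ["ERROR"])
    else (stack ++ [regs[0]!.get! - regs[1]!.get!], regs, answer)

def pyAdd (s : PvSt) : PvSt :=
  match s with
  | (stack, regs, answer) =>
    if regs.contains none then (stack, regs, answer ++ ["ERROR"])
    else (stack ++ [regs[0]!.get! + regs[1]!.get!], regs, answer)

def pyPrt (s : PvSt) : PvSt :=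
  match s with
  | (stack, regs, answer) =>
    if stack.isEmpty then (stack, regs, answer ++ ["EMPTY"])
    else (stack.dropLast, regs, answer ++ [PySem.Int.toStr stack.getLast!])

def pyCommands : List String :=
  ["POPA", "POPB", "ADD", "SUB", "PUSH0", "PUSH1", "PUSH2", "PUSH3", "SWAP", "PRINT"]

-- loop body: membership test, then the ten sequential (non-elif) ifs of A
def pyStep (s : PvSt) (cmd : String) : PvSt :=
  if ¬ pyCommands.contains cmd then (s.1, s.2.1, s.2.2 ++ ["UNKNOWN"])
  else
    let s := if cmd = "POPA" then pyPop s 'A' else s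
    let s := if cmd = "POPB" then pyPop s 'B' else s
    let s := if cmd = "ADD" then pyAdd s else s
    let s := if cmd = "SUB" then pySub s else s
    let s := if cmd = "PUSH0" then pyPush s 0 else s
    let s := if cmd = "PUSH1" then pyPush s 1 else s
    let s := if cmd = "PUSH2" then pyPush s 2 else s
    let s := if cmd = "PUSH3" then pyPush s 3 else s
    let s := if cmd = "SWAP" then pySwap s else s
    let s := if cmd = "PRINT" then pyPrt s else s
    s

def solution (params : List String) : List String :=
  (params.foldl pyStep ([], [none, none], [])).2.2

-- ===== PORT B =====
def altPopr (i : Nat) (s : PvSt) : PvSt :=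
  match s with
  | (st, regs, out) =>
    if st.isEmpty then (st, regs, out ++ ["EMPTY"])
    else (st.dropLast, regs.set i (some st.getLast!), out)

def altPushc (c : Int) (s : PvSt) : PvSt :=
  match s with
  | (st, regs, out) =>
    if st.length ≥ 8 then (st, regs, out ++ ["OVERFLOW"])
    else (st ++ [c], regs, out)

def altBinop (op : Int → Int → Int) (s : PvSt) : PvSt :=
  match s with
  | (st, regs, out) =>
    if regs.contains none then (st, regs, out ++ ["ERROR"])
    else (st ++ [op regs[0]!.get! regs[1]!.get!], regs, out)

def altSwapf (s : PvSt) : PvSt :=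
  match s with
  | (st, regs, out) =>
    if regs.contains none then (st, regs, out ++ ["ERROR"])
    else (st, [regs[1]!, regs[0]!], out)

def altPrtf (s : PvSt) : PvSt :=
  match s with
  | (st, regs, out) =>
    if st.isEmpty then (st, regs, out ++ ["EMPTY"])
    else (st.dropLast, regs, out ++ [PySem.Int.toStr st.getLast!])

def altTable : PySem.Dict String (PvSt → PvSt) :=
  PySem.Dict.ofList [("POPA", altPopr 0), ("POPB", altPopr 1),
   ("ADD", altBinop (· + ·)), ("SUB", altBinop (· - ·)),
   ("PUSH0", altPushc 0), ("PUSH1", altPushc 1), ("PUSH2", altPushc 2), ("PUSH3", altPushc 3),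
   ("SWAP", altSwapf), ("PRINT", altPrtf)]

def altStep (s : PvSt) (cmd : String) : PvSt :=
  match PySem.Dict.get? altTable cmd with
  | none => (s.1, s.2.1, s.2.2 ++ ["UNKNOWN"])
  | some f => f s

def solution_alt (params : List String) : List String :=
  (params.foldl altStep ([], [none, none], [])).2.2

-- ===== PRECONDITION & SPEC =====
def Spec_solution (params : List String) (out : List String) : Prop := out = solution_alt params
instance (params : List String) (out : List String) : Decidable (Spec_solution params out) := by unfold Spec_solution; infer_instance

-- ===== CLAIM (what is proved, stated in full; the proofs are below) =====
def Claim_equal_solution : Prop := ∀ (params : List String), Dom_solution params → Spec_solution params (solution params)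

-- ===== LEMMAS AND PROOFS =====
theorem pvStep_eq (s : PvSt) (cmd : String) : pyStep s cmd = altStep s cmd := by
  by_cases h0 : cmd = "POPA"
  · subst h0; rfl
  by_cases h1 : cmd = "POPB"
  · subst h1; rfl
  by_cases h2 : cmd = "ADD"
  · subst h2; rfl
  by_cases h3 : cmd = "SUB"
  · subst h3; rfl
  by_cases h4 : cmd = "PUSH0"
  · subst h4; rfl
  by_cases h5 : cmd = "PUSH1"
  · subst h5; rfl
  by_cases h6 : cmd = "PUSH2"
  · subst h6; rfl
  by_cases h7 : cmd = "PUSH3"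
  · subst h7; rfl
  by_cases h8 : cmd = "SWAP"
  · subst h8; rfl
  by_cases h9 : cmd = "PRINT"
  · subst h9; rfl
  · simp [pyStep, altStep, pyCommands, altTable, PySem.Dict.ofList, PySem.Dict.update,
      PySem.Dict.get?_insert, PySem.Dict.get?_empty,
      h0, h1, h2, h3, h4, h5, h6, h7, h8, h9]

theorem pvFoldl_eq (params : List String) (s : PvSt) :
    params.foldl pyStep s = params.foldl altStep s := by
  induction params generalizing s with
  | nil => rfl
  | cons c cs ih => simp [List.foldl, pvStep_eq, ih]

-- ===== VERDICT (by name: the statement is the Claim_ definition above) =====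
theorem solution_spec : Claim_equal_solution := by
  intro params _
  unfold Spec_solution solution solution_alt
  rw [pvFoldl_eq]
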